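-- pv_equiv track=rewrite | github.com/iansseijelly/bril | examples/04-memory/mem.py | intersect_pointer_maps
-- ===== SOURCE A (Python) =====
-- def union_pointer_sets(pointer_sets):
--     """
--     pointer_sets is a list of strings
--     """
--     # remove all None values
--     pointer_sets = [ps for ps in pointer_sets if ps is not None]
--     return set().union(*pointer_sets)
--
-- def intersect_pointer_maps(pred_pointer_maps):
--     # gather all possible keys
--     ret_map = {}
--     keys = set()
--     for pred_pointer_map in pred_pointer_maps:
--         keys.update(pred_pointer_map.keys())
--     for k in keys:
--         values = [pred_pointer_map.get(k, None) for pred_pointer_map in pred_pointer_maps]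
--         ret_map[k] = union_pointer_sets(values)
--     return ret_map
-- ===== SOURCE B (Python) =====
-- def intersect_pointer_maps(pred_pointer_maps):
--     # single pass over each map's items: union into ret via setdefault
--     ret_map = {}
--     for pred_pointer_map in pred_pointer_maps:
--         for k, vs in pred_pointer_map.items():
--             s = ret_map.setdefault(k, set())
--             s.update(vs)
--     return ret_map
-- ===== Notes on version B (the rewrite author's own statement) =====
-- stated objective: faster
-- what changed: Replaces A's two-phase scan (collect all keys into a set, then for each key re-scan every map with .get) by a single pass over each map's items that unions into the result via setdefault; Pre_ excludes inner association lists with duplicate keys, which encode no Python dict and whose assoc-list reading is ambiguous.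
import Mathlib
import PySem

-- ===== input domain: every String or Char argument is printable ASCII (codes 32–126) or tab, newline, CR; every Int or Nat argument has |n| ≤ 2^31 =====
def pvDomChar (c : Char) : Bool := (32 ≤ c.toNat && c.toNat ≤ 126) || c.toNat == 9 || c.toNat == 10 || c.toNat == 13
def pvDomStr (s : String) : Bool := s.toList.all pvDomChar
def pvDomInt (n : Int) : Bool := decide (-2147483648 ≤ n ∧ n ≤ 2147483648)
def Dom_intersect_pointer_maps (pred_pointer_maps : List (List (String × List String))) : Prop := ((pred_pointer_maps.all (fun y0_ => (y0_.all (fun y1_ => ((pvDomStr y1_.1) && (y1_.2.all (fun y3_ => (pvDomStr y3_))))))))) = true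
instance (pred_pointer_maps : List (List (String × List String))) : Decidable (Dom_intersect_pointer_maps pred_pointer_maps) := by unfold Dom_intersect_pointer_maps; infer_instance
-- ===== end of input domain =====

-- B replaces A's two-phase O(keys·maps) scan (gather all keys, then re-scan every map per key)
-- by one pass over each map's entries, unioning into the result via setdefault — O(total entries).
-- Output is a dict (compared ignoring key order); Python's hash iteration order over the key set
-- is not modelled, the ports use first-insertion order on both sides.

-- ===== PORT A =====
def union_pointer_sets (pointer_sets : List (Option (List String))) : List String :=
  -- remove all None values
  let ps := pointer_sets.filterMap id
  -- set().union(*pointer_sets): add each iterable's elements in order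
  ps.foldl (fun s l => PySem.Set.update s l) PySem.Set.empty

def intersect_pointer_maps (pred_pointer_maps : List (List (String × List String))) : List (String × List String) :=
  -- keys = set(); for m in maps: keys.update(m.keys())
  let keys : PySem.Set String :=
    pred_pointer_maps.foldl
      (fun ks m => PySem.Set.update ks (PySem.Dict.keys (PySem.Dict.mk m))) PySem.Set.empty
  -- for k in keys: ret_map[k] = union_pointer_sets([m.get(k, None) for m in maps])
  let ret : PySem.Dict String (List String) :=
    keys.foldl
      (fun ret k =>
        PySem.Dict.insert ret k
          (union_pointer_sets (pred_pointer_maps.map (fun m => PySem.Dict.get? (PySem.Dict.mk m) k))))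
      PySem.Dict.empty
  ret.items

-- ===== PORT B =====
def intersect_pointer_maps_alt (pred_pointer_maps : List (List (String × List String))) : List (String × List String) :=
  -- ret = {}; for m in maps: for (k, vs) in m.items(): ret.setdefault(k, set()).update(vs)
  (pred_pointer_maps.foldl
    (fun ret m =>
      m.foldl
        (fun ret p =>
          PySem.Dict.modify ret p.1 PySem.Set.empty (fun s => PySem.Set.update s p.2))
        ret)
    PySem.Dict.empty).items

-- ===== PRECONDITION & SPEC =====
-- Pre_ excludes inner association lists with duplicate keys: they encode no Python dict
-- (a Python dict cannot hold a key twice), so the assoc-list representation is ambiguous there.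
def Pre_intersect_pointer_maps (pred_pointer_maps : List (List (String × List String))) : Prop :=
  ∀ m ∈ pred_pointer_maps, (m.map Prod.fst).Nodup

instance (pred_pointer_maps : List (List (String × List String))) : Decidable (Pre_intersect_pointer_maps pred_pointer_maps) := by
  unfold Pre_intersect_pointer_maps; infer_instance

def pvWitness_intersect_pointer_maps : (List (List (String × List String))) :=
  [[("a", ["x", "y"]), ("b", [])], [("a", ["z"]), ("c", ["x"])]]

def Spec_intersect_pointer_maps (pred_pointer_maps : List (List (String × List String))) (out : List (String × List String)) : Prop := out = intersect_pointer_maps_alt pred_pointer_maps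
instance (pred_pointer_maps : List (List (String × List String))) (out : List (String × List String)) : Decidable (Spec_intersect_pointer_maps pred_pointer_maps out) := by unfold Spec_intersect_pointer_maps; infer_instance

-- ===== CLAIM (what is proved, stated in full; the proofs are below) =====
def Claim_equal_intersect_pointer_maps : Prop := ∀ (pred_pointer_maps : List (List (String × List String))), Dom_intersect_pointer_maps pred_pointer_maps → Pre_intersect_pointer_maps pred_pointer_maps → Spec_intersect_pointer_maps pred_pointer_maps (intersect_pointer_maps pred_pointer_maps)

-- ===== LEMMAS AND PROOFS =====

-- the keys appearing in any map, in first-occurrence order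
def pvKeysOf (maps : List (List (String × List String))) : PySem.Set String :=
  maps.foldl (fun ks m => PySem.Set.update ks (m.map Prod.fst)) PySem.Set.empty

-- per-key merged value: union over the maps, in map order, of the first-match value of k
def pvKeyVal (maps : List (List (String × List String))) (k : String) : List String :=
  maps.foldl
    (fun s m =>
      match PySem.Dict.get? (PySem.Dict.mk m) k with
      | some vs => PySem.Set.update s vs
      | none => s)
    PySem.Set.empty

theorem pvKeysOf_nodup (maps : List (List (String × List String))) : (pvKeysOf maps).Nodup := by
  unfold pvKeysOf
  induction maps using List.reverseRecOn with
  | nil => simp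
  | append_singleton ms m ih =>
    rw [List.foldl_append, List.foldl_cons, List.foldl_nil]
    exact PySem.Set.nodup_update _ _ ih

theorem unionVal_eq_keyVal (maps : List (List (String × List String))) (k : String) :
    union_pointer_sets (maps.map (fun m => PySem.Dict.get? (PySem.Dict.mk m) k)) = pvKeyVal maps k := by
  unfold union_pointer_sets pvKeyVal
  simp only []
  generalize (PySem.Set.empty : PySem.Set String) = s
  induction maps generalizing s with
  | nil => rfl
  | cons m ms ih =>
    simp only [List.map_cons, List.filterMap_cons, List.foldl_cons]
    cases PySem.Dict.get? (PySem.Dict.mk m) k with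
    | none => exact ih s
    | some vs => exact ih _

-- A's items: the key set, each paired with the merged value
theorem portA_items (maps : List (List (String × List String))) :
    intersect_pointer_maps maps = (pvKeysOf maps).map (fun k => (k, pvKeyVal maps k)) := by
  have h := PySem.Dict.items_foldl_insert_fresh
    (k := fun (a : String) => a)
    (v := fun a => union_pointer_sets (maps.map (fun m => PySem.Dict.get? (PySem.Dict.mk m) a)))
    (l := pvKeysOf maps) (d := (PySem.Dict.empty : PySem.Dict String (List String)))
    (fun a _ => PySem.Dict.contains_empty a) (by simpa using pvKeysOf_nodup maps)
  exact h.trans (by simp [PySem.Dict.empty, unionVal_eq_keyVal])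

-- one map's inner loop, on the value at key k (needs that the map's keys are distinct)
theorem inner_getD (m : List (String × List String)) (hm : (m.map Prod.fst).Nodup)
    (d : PySem.Dict String (List String)) (k : String) :
    (m.foldl (fun ret p => PySem.Dict.modify ret p.1 PySem.Set.empty (fun s => PySem.Set.update s p.2)) d).getD k PySem.Set.empty
      = match PySem.Dict.get? (PySem.Dict.mk m) k with
        | some vs => PySem.Set.update (d.getD k PySem.Set.empty) vs
        | none => d.getD k PySem.Set.empty := by
  induction m generalizing d with
  | nil => rfl
  | cons p m ih =>
    simp only [List.map_cons, List.nodup_cons] at hm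
    rw [List.foldl_cons, ih hm.2, PySem.Dict.get?_mk_cons]
    by_cases hk : p.1 = k
    · subst hk
      have hnone : PySem.Dict.get? (PySem.Dict.mk m) p.1 = none := by
        rw [PySem.Dict.get?_eq_none_iff_not_mem_keys]
        simpa using hm.1
      simp [hnone, PySem.Dict.getD_modify_self]
    · have hbe : (p.1 == k) = false := by simpa using hk
      have hmod := PySem.Dict.getD_modify_of_ne
        (d := d) (k := p.1) (k' := k) (d0 := (PySem.Set.empty : List String))
        (f := fun s => PySem.Set.update s p.2) (Ne.symm hk)
      simp only [hbe, Bool.false_eq_true, if_false, hmod]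

-- the whole of B's loop, on the value at key k
theorem portB_getD (maps : List (List (String × List String)))
    (h : ∀ m ∈ maps, (m.map Prod.fst).Nodup)
    (d : PySem.Dict String (List String)) (k : String) :
    (maps.foldl
      (fun ret m =>
        m.foldl (fun ret p => PySem.Dict.modify ret p.1 PySem.Set.empty (fun s => PySem.Set.update s p.2)) ret)
      d).getD k PySem.Set.empty
      = maps.foldl
          (fun s m =>
            match PySem.Dict.get? (PySem.Dict.mk m) k with
            | some vs => PySem.Set.update s vs
            | none => s)
          (d.getD k PySem.Set.empty) := by
  induction maps generalizing d with
  | nil => rfl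
  | cons m ms ih =>
    rw [List.foldl_cons, List.foldl_cons,
      ih (fun m hm => h m (List.mem_cons_of_mem _ hm)),
      inner_getD m (h m (List.mem_cons_self ..))]

-- B's key list is the same first-occurrence key set
theorem portB_keys (maps : List (List (String × List String))) (d : PySem.Dict String (List String)) :
    (maps.foldl
      (fun ret m =>
        m.foldl (fun ret p => PySem.Dict.modify ret p.1 PySem.Set.empty (fun s => PySem.Set.update s p.2)) ret)
      d).keys
      = maps.foldl (fun ks m => PySem.Set.update ks (m.map Prod.fst)) d.keys := by
  induction maps generalizing d with
  | nil => rfl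
  | cons m ms ih =>
    rw [List.foldl_cons, List.foldl_cons, ih,
      PySem.Dict.keys_foldl_modify_key (key := Prod.fst)]

theorem portB_items (maps : List (List (String × List String)))
    (h : ∀ m ∈ maps, (m.map Prod.fst).Nodup) :
    intersect_pointer_maps_alt maps = (pvKeysOf maps).map (fun k => (k, pvKeyVal maps k)) := by
  unfold intersect_pointer_maps_alt
  have hkeys :
      (maps.foldl
        (fun ret m =>
          m.foldl (fun ret p => PySem.Dict.modify ret p.1 PySem.Set.empty (fun s => PySem.Set.update s p.2)) ret)
        PySem.Dict.empty).keys = pvKeysOf maps := by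
    rw [portB_keys]; rfl
  rw [PySem.Dict.items_eq_map_keys _ (by rw [hkeys]; exact pvKeysOf_nodup maps) PySem.Set.empty,
    hkeys]
  refine List.map_congr_left (fun k _ => ?_)
  rw [portB_getD maps h]
  rfl

-- ===== VERDICT (by name: the statement is the Claim_ definition above) =====
theorem intersect_pointer_maps_spec : Claim_equal_intersect_pointer_maps := by
  intro maps _ hpre
  unfold Spec_intersect_pointer_maps
  rw [portA_items, portB_items maps hpre]
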